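-- pv_equiv track=rewrite | github.com/heeropang/VirtualPullDown | fast_predict/script/ESMFold_local_gui.py | add_position_labels
-- ===== SOURCE A (Python) =====
-- def add_position_labels(sequence):
--     positions = list(range(10, len(sequence) + 1, 10))
--     labeled_sequence = ""
--     for i, char in enumerate(sequence):
--         labeled_sequence += char
--         if (i + 1) % 10 == 0:
--             labeled_sequence += " <sup>{:3d}</sup> ".format(i + 1)
--         if (i + 1) % 50 == 0:
--             labeled_sequence += "\n"
--     return f"<pre>{labeled_sequence}</pre>"
-- ===== SOURCE B (Python) =====
-- def add_position_labels(sequence):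
--     parts = []
--     for start in range(0, len(sequence), 10):
--         chunk = sequence[start:start+10]
--         parts.append(chunk)
--         if len(chunk) == 10:
--             parts.append(" <sup>{:3d}</sup> ".format(start + 10))
--             if (start + 10) % 50 == 0:
--                 parts.append("\n")
--     return "<pre>" + "".join(parts) + "</pre>"
-- ===== Notes on version B (the rewrite author's own statement) =====
-- stated objective: faster
-- what changed: B replaces A's per-character loop with per-character modulo tests and string += by a stepped loop over block starts (range(0, len, 10)) that appends each 10-char slice and its label as list parts joined once at the end.
import Mathlib
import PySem

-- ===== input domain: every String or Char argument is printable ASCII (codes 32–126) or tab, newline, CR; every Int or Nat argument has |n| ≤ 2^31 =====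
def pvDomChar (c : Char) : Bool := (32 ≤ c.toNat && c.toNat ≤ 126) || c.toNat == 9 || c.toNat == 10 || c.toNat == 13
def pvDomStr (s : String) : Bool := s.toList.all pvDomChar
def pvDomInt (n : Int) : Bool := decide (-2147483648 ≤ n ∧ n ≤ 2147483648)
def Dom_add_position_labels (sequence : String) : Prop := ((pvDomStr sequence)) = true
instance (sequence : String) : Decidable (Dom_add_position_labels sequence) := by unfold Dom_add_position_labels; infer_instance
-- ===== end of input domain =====

-- B builds the result from 10-char slices (one loop step per block, slice and label appended
-- together, parts joined at the end) instead of A's per-character loop with modulo tests.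

-- " <sup>{:3d}</sup> ".format(n)  (right-justify str(n) in width 3 with spaces) — the same
-- format call both Pythons make
def pvSupLabel (n : Int) : List Char :=
  let ds := PySem.Int.toChars n
  (" <sup>".toList) ++ List.replicate (3 - ds.length) ' ' ++ ds ++ ("</sup> ".toList)

-- ===== PORT A =====
def pvGoA : List Char → Nat → List Char → List Char
  | [], _, acc => acc
  | c :: rest, i, acc =>
    pvGoA rest (i + 1)
      (((acc ++ [c]) ++ (if (i + 1) % 10 = 0 then pvSupLabel ((i : Int) + 1) else []))
        ++ (if (i + 1) % 50 = 0 then ['\n'] else []))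

def add_position_labels (sequence : String) : String :=
  let _positions := PySem.List.pyRange 10 ((sequence.toList.length : Int) + 1) 10  -- A builds this list and never uses it
  String.ofList ("<pre>".toList ++ pvGoA sequence.toList 0 [] ++ "</pre>".toList)

-- ===== PORT B =====
def pvStepB (cs : List Char) (parts : List (List Char)) (start : Int) : List (List Char) :=
  let chunk := PySem.List.slice cs (some start) (some (start + 10))
  let parts := parts ++ [chunk]
  if chunk.length = 10 then
    let parts := parts ++ [pvSupLabel (start + 10)]
    if PySem.Int.mod (start + 10) 50 = 0 then parts ++ [['\n']] else parts
  else parts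

def add_position_labels_alt (sequence : String) : String :=
  let cs := sequence.toList
  let parts := (PySem.List.pyRange 0 (cs.length : Int) 10).foldl (pvStepB cs) []
  String.ofList ("<pre>".toList ++ parts.flatten ++ "</pre>".toList)

-- ===== PRECONDITION & SPEC =====
def Spec_add_position_labels (sequence : String) (out : String) : Prop := out = add_position_labels_alt sequence
instance (sequence : String) (out : String) : Decidable (Spec_add_position_labels sequence out) := by unfold Spec_add_position_labels; infer_instance

-- ===== CLAIM (what is proved, stated in full; the proofs are below) =====
def Claim_equal_add_position_labels : Prop := ∀ (sequence : String), Dom_add_position_labels sequence → Spec_add_position_labels sequence (add_position_labels sequence)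

-- ===== LEMMAS AND PROOFS =====

-- the block decomposition both loops compute: chunk of ≤10 chars, then (for a full chunk)
-- the position label and (at multiples of 50) a newline
def pvBlocks : List Char → Nat → List (List Char)
  | [], _ => []
  | c :: rest, k =>
    let ch := (c :: rest).take 10
    (if ch.length = 10 then
       ch :: pvSupLabel ((k : Int) + 10) :: (if (k + 10) % 50 = 0 then [['\n']] else [])
     else [ch]) ++ pvBlocks ((c :: rest).drop 10) (k + 10)
termination_by l _ => l.length
decreasing_by simp

lemma pvGoA_append (xs ys : List Char) : ∀ (i : Nat) (acc : List Char),
    pvGoA (xs ++ ys) i acc = pvGoA ys (i + xs.length) (pvGoA xs i acc) := by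
  induction xs with
  | nil => intro i acc; simp [pvGoA]
  | cons c xs ih =>
    intro i acc
    simp only [List.cons_append, pvGoA, ih, List.length_cons]
    congr 1
    omega

lemma pvGoA_no_trigger : ∀ (ys : List Char) (i : Nat) (acc : List Char),
    (∀ t, t < ys.length → (i + t + 1) % 10 ≠ 0) → pvGoA ys i acc = acc ++ ys := by
  intro ys
  induction ys with
  | nil => intro i acc _; simp [pvGoA]
  | cons c ys ih =>
    intro i acc h
    have h0 : (i + 1) % 10 ≠ 0 := by
      have := h 0 (by simp); simpa using this
    have h50 : (i + 1) % 50 ≠ 0 := by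
      intro hc; exact h0 (by omega)
    simp only [pvGoA, if_neg h0, if_neg h50, List.append_nil]
    rw [ih (i + 1) (acc ++ [c]) (by intro t ht; have := h (t + 1) (by simp; omega); omega)]
    simp

lemma pvGoA_full_chunk (ch : List Char) (k : Nat) (acc : List Char)
    (hlen : ch.length = 10) (hk : 10 ∣ k) :
    pvGoA ch k acc
      = acc ++ ch ++ pvSupLabel ((k : Int) + 10)
          ++ (if (k + 10) % 50 = 0 then ['\n'] else []) := by
  obtain ⟨z, hz⟩ : ∃ z, ch.drop 9 = [z] := by
    have : (ch.drop 9).length = 1 := by simp [hlen]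
    exact List.length_eq_one_iff.mp this
  have hsplit : ch = ch.take 9 ++ [z] := by
    conv_lhs => rw [← List.take_append_drop 9 ch, hz]
  have htlen : (ch.take 9).length = 9 := by simp [hlen]
  conv_lhs => rw [hsplit]
  rw [pvGoA_append]
  rw [pvGoA_no_trigger (ch.take 9) k acc (by intro t ht; rw [htlen] at ht; omega)]
  rw [htlen]
  have h10 : (k + 9 + 1) % 10 = 0 := by omega
  simp only [pvGoA, if_pos h10]
  have hc1 : ((k + 9 : Nat) : Int) + 1 = (k : Int) + 10 := by push_cast; ring
  have hc2 : k + 9 + 1 = k + 10 := by omega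
  rw [hc1, hc2]
  conv_rhs => rw [hsplit]
  split <;> simp

lemma pvGoA_eq_blocks : ∀ (n : Nat) (rest : List Char) (k : Nat) (acc : List Char),
    rest.length ≤ n → 10 ∣ k →
    pvGoA rest k acc = acc ++ (pvBlocks rest k).flatten := by
  intro n
  induction n with
  | zero =>
    intro rest k acc hn _
    have : rest = [] := List.length_eq_zero_iff.mp (Nat.le_zero.mp hn)
    subst this; simp [pvGoA, pvBlocks]
  | succ n ih =>
    intro rest k acc hn hk
    match rest with
    | [] => simp [pvGoA, pvBlocks]
    | c :: r =>
      by_cases hge : 10 ≤ (c :: r).length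
      · have hge' : 9 ≤ r.length := by simpa using hge
        have hfull : ((c :: r).take 10).length = 10 := by simp; omega
        have hsplit : (c :: r) = (c :: r).take 10 ++ (c :: r).drop 10 :=
          (List.take_append_drop 10 (c :: r)).symm
        conv_lhs => rw [hsplit]
        rw [pvGoA_append, pvGoA_full_chunk _ k acc hfull hk, hfull]
        rw [ih ((c :: r).drop 10) (k + 10) _
          (by have hc : (c :: r).length = r.length + 1 := rfl
              simp only [List.length_drop, hc] at *; omega) (by omega)]
        rw [pvBlocks]
        simp only [if_pos hfull]
        split <;> simp
      · have hlt : (c :: r).length < 10 := by omega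
        have htake : (c :: r).take 10 = c :: r := List.take_of_length_le (by omega)
        have hdrop : (c :: r).drop 10 = [] := List.drop_eq_nil_of_le (by omega)
        rw [pvGoA_no_trigger (c :: r) k acc (by intro t ht; omega)]
        rw [pvBlocks]
        simp only [htake, hdrop]
        rw [if_neg (by omega : ¬ (c :: r).length = 10)]
        simp [pvBlocks]

lemma pvRange10_nil (a b : Int) (h : b ≤ a) : PySem.List.pyRange a b 10 = [] := by
  rw [PySem.List.pyRange_of_pos a b (by norm_num)]
  simp [if_neg (not_lt.mpr h)]

lemma pvRange10_cons (a b : Int) (h : a < b) :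
    PySem.List.pyRange a b 10 = a :: PySem.List.pyRange (a + 10) b 10 := by
  rw [PySem.List.pyRange_of_pos a b (by norm_num), PySem.List.pyRange_of_pos (a + 10) b (by norm_num)]
  have hcnt : ((b - a + 10 - 1) / 10).toNat
      = (if a + 10 < b then ((b - (a + 10) + 10 - 1) / 10).toNat else 0) + 1 := by
    split <;> omega
  rw [if_pos h, hcnt, List.range_succ_eq_map]
  simp only [List.map_cons, List.map_map, Function.comp_def]
  congr 1
  · norm_num
  · apply List.map_congr_left; intro x _; push_cast; ring

lemma pvFoldB_eq_blocks (cs : List Char) : ∀ (n a : Nat) (parts : List (List Char)),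
    cs.length ≤ a + n →
    (PySem.List.pyRange (a : Int) (cs.length : Int) 10).foldl (pvStepB cs) parts
      = parts ++ pvBlocks (cs.drop a) a := by
  intro n
  induction n with
  | zero =>
    intro a parts hn
    have hle : cs.length ≤ a := by omega
    rw [pvRange10_nil _ _ (by exact_mod_cast hle)]
    rw [List.drop_eq_nil_of_le hle, pvBlocks]
    simp
  | succ n ih =>
    intro a parts hn
    by_cases hlt : a < cs.length
    · rw [pvRange10_cons _ _ (by exact_mod_cast hlt)]
      simp only [List.foldl_cons]
      have hcast : ((a : Int) + 10) = ((a + 10 : Nat) : Int) := by push_cast; ring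
      have hchunk : PySem.List.slice cs (some (a : Int)) (some ((a : Int) + 10))
          = (cs.drop a).take 10 := by
        have := PySem.List.slice_natCast_add cs a 10
        rw [← this]; norm_num
      rw [hcast, ih (a + 10) _ (by omega)]
      obtain ⟨c, r, hcr⟩ : ∃ c r, cs.drop a = c :: r := by
        cases hdr : cs.drop a with
        | nil => exfalso; have := List.drop_eq_nil_iff.mp hdr; omega
        | cons c r => exact ⟨c, r, rfl⟩
      have hdd : cs.drop (a + 10) = (cs.drop a).drop 10 := by
        rw [List.drop_drop]
      have hmod : (PySem.Int.mod ((a : Int) + 10) 50 = 0) ↔ ((a + 10) % 50 = 0) := by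
        rw [hcast, show (50 : Int) = ((50 : Nat) : Int) from rfl, PySem.Int.mod_natCast]
        exact_mod_cast Iff.rfl
      conv_rhs => rw [hcr, pvBlocks]
      simp only [pvStepB, hchunk, hdd, hcr]
      by_cases hfull : ((c :: r).take 10).length = 10
      · rw [if_pos hfull, if_pos hfull]
        by_cases h50 : (a + 10) % 50 = 0
        · rw [if_pos (hmod.mpr h50), if_pos h50]; simp
        · rw [if_neg (fun hc => h50 (hmod.mp hc)), if_neg h50]; simp
      · rw [if_neg hfull, if_neg hfull]; simp
    · have hle : cs.length ≤ a := not_lt.mp hlt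
      rw [pvRange10_nil _ _ (by exact_mod_cast hle)]
      rw [List.drop_eq_nil_of_le hle, pvBlocks]
      simp

-- ===== VERDICT (by name: the statement is the Claim_ definition above) =====
theorem add_position_labels_spec : Claim_equal_add_position_labels := by
  intro sequence _
  unfold Spec_add_position_labels
  have hA : pvGoA sequence.toList 0 [] = (pvBlocks sequence.toList 0).flatten := by
    simpa using pvGoA_eq_blocks sequence.toList.length sequence.toList 0 [] le_rfl ⟨0, rfl⟩
  have hB : (PySem.List.pyRange 0 (sequence.toList.length : Int) 10).foldl (pvStepB sequence.toList) []
      = pvBlocks sequence.toList 0 := by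
    have h := pvFoldB_eq_blocks sequence.toList sequence.toList.length 0 [] (by omega)
    simpa using h
  unfold add_position_labels add_position_labels_alt
  simp only [hA, hB]
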